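-- pv_equiv track=rewrite | github.com/textflint/textflint | textflint/input_layer/component/sample/mrc_sample.py | get_answer_tokens
-- ===== SOURCE A (Python) =====
-- def get_answer_tokens(sent_tokens, answer):
--     """
--     Extract the pos, ner, lemma tags of answer tokens
--
--     :param list sent_tokens: a list of dicts
--     :param str answer: answer
--     :return: a list of dicts
--         like [
--         {'word': 'Saint', 'pos': 'NNP', 'lemma': 'Saint', 'ner': 'PERSON'},
--         {'word': 'Bernadette', 'pos': 'NNP', 'lemma': 'Bernadette', ...},
--         {'word': 'Soubirous', 'pos': 'NNP', 'lemma': 'Soubirous', ...]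
--         ]
--
--     """
--
--     sent = " ".join([t['word'] for t in sent_tokens])
--     start = sent.find(answer)
--     end = start + len(answer)
--     tokens = []
--     length = 0
--     for i, tok in enumerate(sent_tokens):
--         if length > end:
--             break
--         if start <= length < end:
--             tokens.append(tok)
--         length = length + 1 + len(tok['word'])
--     return tokens
-- ===== SOURCE B (Python) =====
-- def _bisect_left(a, x):
--     # stdlib bisect.bisect_left, inlined (this module imports nothing)
--     lo, hi = 0, len(a)
--     while lo < hi:
--         mid = (lo + hi) // 2
--         if a[mid] < x:
--             lo = mid + 1
--         else:
--             hi = mid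
--     return lo
--
--
-- def get_answer_tokens(sent_tokens, answer):
--     words = [t['word'] for t in sent_tokens]
--     sent = " ".join(words)
--     start = sent.find(answer)
--     end = start + len(answer)
--     offsets = []
--     acc = 0
--     for w in words:
--         offsets.append(acc)
--         acc += len(w) + 1
--     lo = _bisect_left(offsets, start)
--     hi = _bisect_left(offsets, end)
--     return sent_tokens[lo:hi]
-- ===== Notes on version B (the rewrite author's own statement) =====
-- stated objective: alternative
-- what changed: A's single scan that tracks a running character offset and breaks past the span is replaced by building a prefix-sum table of token start offsets, locating the span's two boundary indices with binary search (bisect_left), and returning one slice sent_tokens[lo:hi].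
import Mathlib
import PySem

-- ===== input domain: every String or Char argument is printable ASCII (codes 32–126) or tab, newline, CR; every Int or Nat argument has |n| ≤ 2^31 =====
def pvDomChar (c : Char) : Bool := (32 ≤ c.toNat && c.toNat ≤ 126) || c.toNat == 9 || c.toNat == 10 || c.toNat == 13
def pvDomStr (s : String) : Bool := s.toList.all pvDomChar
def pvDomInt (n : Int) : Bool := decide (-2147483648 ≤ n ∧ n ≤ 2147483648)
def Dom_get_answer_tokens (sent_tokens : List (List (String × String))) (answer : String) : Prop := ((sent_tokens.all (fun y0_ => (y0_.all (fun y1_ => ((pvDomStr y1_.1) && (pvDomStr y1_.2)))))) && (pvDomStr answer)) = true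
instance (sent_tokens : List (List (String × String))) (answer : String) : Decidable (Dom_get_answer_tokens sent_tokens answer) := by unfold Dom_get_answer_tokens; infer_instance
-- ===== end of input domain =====

-- B replaces A's single offset-tracking scan with a prefix-sum offset table plus two
-- binary searches (bisect_left) and a slice; same cost class, different decomposition.

-- t['word']; exact whenever the dict has the key "word" (guaranteed by Pre_; Python raises KeyError otherwise)
def pvWord (t : List (String × String)) : String := (PySem.Dict.get? (PySem.Dict.mk t) "word").getD ""

-- ===== PORT A =====
-- A's for-loop with its break, as structural recursion over the token list
def pvALoop (start end_ : Int) : List (List (String × String)) → Int → List (List (String × String))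
  | [], _ => []
  | tok :: rest, length =>
    if length > end_ then []
    else
      (if start ≤ length ∧ length < end_ then [tok] else []) ++
        pvALoop start end_ rest (length + 1 + PySem.Str.len (pvWord tok))

def get_answer_tokens (sent_tokens : List (List (String × String))) (answer : String) : List (List (String × String)) :=
  let sent := PySem.Str.join " " (sent_tokens.map pvWord)
  let start := PySem.Str.find sent answer
  let end_ := start + PySem.Str.len answer
  pvALoop start end_ sent_tokens 0

-- ===== PORT B =====
-- offsets list: offsets[i] = start position of word i in the joined sentence
def pvOffsets : List String → Int → List Int
  | [], _ => []
  | w :: ws, acc => acc :: pvOffsets ws (acc + PySem.Str.len w + 1)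

def get_answer_tokens_alt (sent_tokens : List (List (String × String))) (answer : String) : List (List (String × String)) :=
  let words := sent_tokens.map pvWord
  let sent := PySem.Str.join " " words
  let start := PySem.Str.find sent answer
  let end_ := start + PySem.Str.len answer
  let offsets := pvOffsets words 0
  -- Source B's _bisect_left is the stdlib bisect_left loop verbatim; PySem.List.bisectLeft is that loop
  let lo := PySem.List.bisectLeft offsets start
  let hi := PySem.List.bisectLeft offsets end_
  PySem.List.slice sent_tokens (some (lo : Int)) (some (hi : Int))

-- ===== PRECONDITION & SPEC =====
-- Pre_ excludes only inputs where some token dict lacks the key "word": there Python A raises KeyError.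
def Pre_get_answer_tokens (sent_tokens : List (List (String × String))) (answer : String) : Prop :=
  sent_tokens.all (fun t => (PySem.Dict.get? (PySem.Dict.mk t) "word").isSome) = true
instance (sent_tokens : List (List (String × String))) (answer : String) : Decidable (Pre_get_answer_tokens sent_tokens answer) := by unfold Pre_get_answer_tokens; infer_instance

def pvWitness_get_answer_tokens : (List (List (String × String))) × String :=
  ([[("word", "Saint"), ("pos", "NNP")], [("word", "Bernadette"), ("pos", "NNP")]], "Bernadette")

def Spec_get_answer_tokens (sent_tokens : List (List (String × String))) (answer : String) (out : List (List (String × String))) : Prop := out = get_answer_tokens_alt sent_tokens answer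
instance (sent_tokens : List (List (String × String))) (answer : String) (out : List (List (String × String))) : Decidable (Spec_get_answer_tokens sent_tokens answer out) := by unfold Spec_get_answer_tokens; infer_instance

-- ===== CLAIM (what is proved, stated in full; the proofs are below) =====
def Claim_equal_get_answer_tokens : Prop := ∀ (sent_tokens : List (List (String × String))) (answer : String), Dom_get_answer_tokens sent_tokens answer → Pre_get_answer_tokens sent_tokens answer → Spec_get_answer_tokens sent_tokens answer (get_answer_tokens sent_tokens answer)

-- ===== LEMMAS AND PROOFS =====

theorem pvLen_nonneg (w : String) : 0 ≤ PySem.Str.len w := by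
  rw [PySem.Str.len_eq]; exact Int.natCast_nonneg _

-- prefix-sum view of a token list: offset of token k
def pvOff (sent_tokens : List (List (String × String))) (k : Nat) : Int :=
  (((sent_tokens.take k).map (fun t => PySem.Str.len (pvWord t) + 1)).sum)

theorem pvOff_succ (st : List (List (String × String))) (k : Nat) (hk : k < st.length) :
    pvOff st (k + 1) = pvOff st k + 1 + PySem.Str.len (pvWord st[k]) := by
  unfold pvOff
  rw [List.map_take, List.map_take, List.sum_take_succ _ _ (by simpa using hk)]
  simp; ring

theorem pvOffsets_length (ws : List String) (acc : Int) : (pvOffsets ws acc).length = ws.length := by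
  induction ws generalizing acc with
  | nil => rfl
  | cons w ws ih => simp [pvOffsets, ih]

theorem pvOffsets_getElem (ws : List String) (acc : Int) (i : Nat) (h : i < ws.length) :
    (pvOffsets ws acc)[i]'(by rw [pvOffsets_length]; exact h) =
      acc + ((ws.take i).map (fun w => PySem.Str.len w + 1)).sum := by
  induction ws generalizing acc i with
  | nil => simp at h
  | cons w ws ih =>
    cases i with
    | zero => simp [pvOffsets]
    | succ i =>
      simp only [pvOffsets, List.getElem_cons_succ]
      rw [ih _ _ (by simpa using h)]
      simp; ring

theorem pvOffsets_getElem_st (st : List (List (String × String))) (i : Nat) (h : i < st.length) :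
    (pvOffsets (st.map pvWord) 0)[i]'(by rw [pvOffsets_length]; simpa using h) = pvOff st i := by
  rw [pvOffsets_getElem _ _ _ (by simpa using h)]
  unfold pvOff
  rw [← List.map_take, List.map_map]
  simp [Function.comp_def]

theorem pvOffsets_pairwise (ws : List String) (acc : Int) :
    (pvOffsets ws acc).Pairwise (· ≤ ·) := by
  induction ws generalizing acc with
  | nil => exact List.Pairwise.nil
  | cons w ws ih =>
    refine List.Pairwise.cons ?_ (ih _)
    intro y hy
    -- every element of pvOffsets ws acc' is ≥ acc'
    have haux : ∀ (vs : List String) (a : Int) (y : Int), y ∈ pvOffsets vs a → a ≤ y := by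
      intro vs
      induction vs with
      | nil => intro a y hy; simp [pvOffsets] at hy
      | cons v vs ihv =>
        intro a y hy
        simp only [pvOffsets, List.mem_cons] at hy
        rcases hy with rfl | hy
        · exact le_refl _
        · have := ihv _ _ hy
          have := pvLen_nonneg v
          omega
    have := haux ws (acc + PySem.Str.len w + 1) y hy
    have := pvLen_nonneg w
    omega

-- characterisation of bisect on the offsets list: offs[i] < x ↔ i < bisect
theorem pv_bisect_char (st : List (List (String × String))) (x : Int) (i : Nat) (h : i < st.length) :
    pvOff st i < x ↔ i < PySem.List.bisectLeft (pvOffsets (st.map pvWord) 0) x := by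
  have hlen : (pvOffsets (st.map pvWord) 0).length = st.length := by
    rw [pvOffsets_length]; simp
  obtain ⟨hle, hlt, hge⟩ :=
    PySem.List.bisectLeft_spec (pvOffsets (st.map pvWord) 0) x (pvOffsets_pairwise _ _)
  constructor
  · intro hx
    by_contra hc
    push Not at hc
    have := hge i (by omega) hc
    rw [pvOffsets_getElem_st st i h] at this
    omega
  · intro hi
    have := hlt i (by omega) hi
    rwa [pvOffsets_getElem_st st i h] at this

-- A's loop without the break
def pvSel (start end_ : Int) : List (List (String × String)) → Int → List (List (String × String))
  | [], _ => []
  | tok :: rest, length =>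
    (if start ≤ length ∧ length < end_ then [tok] else []) ++
      pvSel start end_ rest (length + 1 + PySem.Str.len (pvWord tok))

theorem pvSel_of_gt (start end_ : Int) (ts : List (List (String × String))) (acc : Int)
    (h : acc > end_) : pvSel start end_ ts acc = [] := by
  induction ts generalizing acc with
  | nil => rfl
  | cons t ts ih =>
    have hl := pvLen_nonneg (pvWord t)
    simp only [pvSel]
    rw [if_neg (by omega), ih _ (by omega)]
    rfl

theorem pvALoop_eq_pvSel (start end_ : Int) (ts : List (List (String × String))) (acc : Int) :
    pvALoop start end_ ts acc = pvSel start end_ ts acc := by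
  induction ts generalizing acc with
  | nil => rfl
  | cons t ts ih =>
    simp only [pvALoop, pvSel]
    by_cases h : acc > end_
    · rw [if_pos h, if_neg (by omega), pvSel_of_gt _ _ _ _ (by have := pvLen_nonneg (pvWord t); omega)]
      rfl
    · rw [if_neg h, ih]

theorem pvSel_drop (start end_ : Int) (st : List (List (String × String))) (lo hi : Nat)
    (hlo : ∀ i, i < st.length → (pvOff st i < start ↔ i < lo))
    (hhi : ∀ i, i < st.length → (pvOff st i < end_ ↔ i < hi))
    (hlon : lo ≤ st.length) (hhin : hi ≤ st.length) :
    ∀ k, k ≤ st.length →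
      pvSel start end_ (st.drop k) (pvOff st k) =
        (st.drop (max lo k)).take (hi - max lo k) := by
  intro k hk
  induction hn : st.length - k generalizing k with
  | zero =>
    have hk' : k = st.length := by omega
    subst hk'
    rw [List.drop_length]
    have h1 : max lo st.length = st.length := by omega
    rw [h1]
    simp [pvSel, Nat.sub_eq_zero_of_le hhin]
  | succ m ih =>
    have hklt : k < st.length := by omega
    rw [List.drop_eq_getElem_cons hklt]
    simp only [pvSel]
    rw [← pvOff_succ st k hklt, ih (k + 1) (by omega) (by omega)]
    have hcond : (start ≤ pvOff st k ∧ pvOff st k < end_) ↔ (lo ≤ k ∧ k < hi) := by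
      have h1 := hlo k hklt
      have h2 := hhi k hklt
      constructor <;> intro ⟨a, b⟩ <;> constructor <;> omega
    by_cases hsel : lo ≤ k ∧ k < hi
    · rw [if_pos (hcond.mpr hsel)]
      obtain ⟨h1, h2⟩ := hsel
      have e1 : max lo k = k := by omega
      have e2 : max lo (k + 1) = k + 1 := by omega
      rw [e1, e2]
      have e3 : hi - k = (hi - (k + 1)) + 1 := by omega
      rw [e3, List.drop_eq_getElem_cons hklt, List.take_succ_cons]
      rfl
    · rw [if_neg (fun hc => hsel (hcond.mp hc))]
      rcases Nat.lt_or_ge k lo with hlt | hge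
      · have e1 : max lo k = lo := by omega
        have e2 : max lo (k + 1) = lo := by omega
        rw [e1, e2]
        rfl
      · have hkhi : hi ≤ k := by omega
        have e1 : max lo k = k := by omega
        have e2 : max lo (k + 1) = k + 1 := by omega
        rw [e1, e2, Nat.sub_eq_zero_of_le (by omega), Nat.sub_eq_zero_of_le (by omega)]
        simp

-- ===== VERDICT (by name: the statement is the Claim_ definition above) =====
theorem get_answer_tokens_spec : Claim_equal_get_answer_tokens := by
  intro st answer _ _
  unfold Spec_get_answer_tokens get_answer_tokens get_answer_tokens_alt
  simp only []
  set start := PySem.Str.find (PySem.Str.join " " (st.map pvWord)) answer with hstart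
  set end_ := start + PySem.Str.len answer with hend
  set lo := PySem.List.bisectLeft (pvOffsets (st.map pvWord) 0) start with hlodef
  set hi := PySem.List.bisectLeft (pvOffsets (st.map pvWord) 0) end_ with hhidef
  have hlen : (pvOffsets (st.map pvWord) 0).length = st.length := by
    rw [pvOffsets_length]; simp
  have hlospec := PySem.List.bisectLeft_spec (pvOffsets (st.map pvWord) 0) start (pvOffsets_pairwise _ _)
  have hhispec := PySem.List.bisectLeft_spec (pvOffsets (st.map pvWord) 0) end_ (pvOffsets_pairwise _ _)
  have hlon : lo ≤ st.length := by rw [hlodef, ← hlen]; exact hlospec.1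
  have hhin : hi ≤ st.length := by rw [hhidef, ← hlen]; exact hhispec.1
  have hlochar : ∀ i, i < st.length → (pvOff st i < start ↔ i < lo) :=
    fun i h => pv_bisect_char st start i h
  have hhichar : ∀ i, i < st.length → (pvOff st i < end_ ↔ i < hi) :=
    fun i h => pv_bisect_char st end_ i h
  have hmain := pvSel_drop start end_ st lo hi hlochar hhichar hlon hhin 0 (Nat.zero_le _)
  simp only [List.drop_zero, Nat.max_zero] at hmain
  have hoff0 : pvOff st 0 = 0 := by simp [pvOff]
  rw [pvALoop_eq_pvSel]
  rw [← hoff0, hmain, PySem.List.slice_natCast]
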